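-- pv_equiv track=rewrite | github.com/jianangong/bdm_final | final1.py | breaktoyear
-- ===== SOURCE A (Python) =====
-- def breaktoyear(records):
--     for r in records:
--         if r[0][1]=='2015':
--             yield (r[0][0], (r[1], 0, 0, 0, 0))
--         elif r[0][1]=='2016':
--             yield (r[0][0], (0, r[1], 0, 0, 0))
--         elif r[0][1]=='2017':
--             yield (r[0][0], (0, 0, r[1], 0, 0))
--         elif r[0][1]=='2018':
--             yield (r[0][0], (0, 0, 0, r[1], 0))
--         elif r[0][1]=='2019':
--             yield (r[0][0], (0, 0, 0, 0, r[1]))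
--         else:
--             yield (r[0][0], (0, 0, 0, 0, 0))
-- ===== SOURCE B (Python) =====
-- def breaktoyear(records):
--     recs = list(records)
--     names = [r[0][0] for r in recs]
--     cols = [[r[1] if r[0][1] == y else 0 for r in recs]
--             for y in ('2015', '2016', '2017', '2018', '2019')]
--     for row in zip(names, *cols):
--         yield (row[0], row[1:])
-- ===== Notes on version B (the rewrite author's own statement) =====
-- stated objective: alternative
-- what changed: Columnar staged passes: builds one per-year column list per year in separate passes, then zips the name list with the five columns, instead of A's single pass with a six-way branch assembling each tuple in place.
import Mathlib
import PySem

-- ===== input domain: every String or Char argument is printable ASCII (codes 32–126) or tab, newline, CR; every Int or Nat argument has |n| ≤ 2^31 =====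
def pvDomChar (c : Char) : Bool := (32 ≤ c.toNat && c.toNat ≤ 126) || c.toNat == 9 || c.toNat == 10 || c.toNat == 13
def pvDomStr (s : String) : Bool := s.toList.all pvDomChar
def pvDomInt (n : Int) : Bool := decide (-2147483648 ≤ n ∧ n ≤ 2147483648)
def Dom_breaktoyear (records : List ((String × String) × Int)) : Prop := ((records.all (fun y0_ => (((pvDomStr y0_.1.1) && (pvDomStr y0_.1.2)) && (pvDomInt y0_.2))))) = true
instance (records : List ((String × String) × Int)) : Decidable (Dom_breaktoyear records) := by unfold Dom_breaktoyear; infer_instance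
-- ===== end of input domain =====

-- B builds the result by staged columnar passes (a name list and five per-year column lists, then a six-way zip) instead of A's single pass with a six-way branch; objective: alternative decomposition, same cost.


-- ===== PORT A =====
def breaktoyear (records : List ((String × String) × Int)) : List (String × (Int × Int × Int × Int × Int)) :=
  records.map (fun r =>
    if r.1.2 == "2015" then (r.1.1, (r.2, 0, 0, 0, 0))
    else if r.1.2 == "2016" then (r.1.1, (0, r.2, 0, 0, 0))
    else if r.1.2 == "2017" then (r.1.1, (0, 0, r.2, 0, 0))
    else if r.1.2 == "2018" then (r.1.1, (0, 0, 0, r.2, 0))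
    else if r.1.2 == "2019" then (r.1.1, (0, 0, 0, 0, r.2))
    else (r.1.1, (0, 0, 0, 0, 0)))

-- ===== PORT B =====
-- zip(names, *cols) of Source B: a six-way zip, stopping at the shortest list (here all have equal length)
def zip6 : List String → List Int → List Int → List Int → List Int → List Int →
    List (String × (Int × Int × Int × Int × Int))
  | n :: ns, a :: as_, b :: bs, c :: cs, d :: ds, e :: es =>
      (n, (a, b, c, d, e)) :: zip6 ns as_ bs cs ds es
  | _, _, _, _, _, _ => []

def breaktoyear_alt (records : List ((String × String) × Int)) : List (String × (Int × Int × Int × Int × Int)) :=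
  let names := records.map (fun r => r.1.1)
  let cols := ["2015", "2016", "2017", "2018", "2019"].map
    (fun y => records.map (fun r => if r.1.2 == y then r.2 else 0))
  match cols with
  | [c0, c1, c2, c3, c4] => zip6 names c0 c1 c2 c3 c4
  | _ => []

-- ===== PRECONDITION & SPEC =====
def Spec_breaktoyear (records : List ((String × String) × Int)) (out : List (String × (Int × Int × Int × Int × Int))) : Prop := out = breaktoyear_alt records
instance (records : List ((String × String) × Int)) (out : List (String × (Int × Int × Int × Int × Int))) : Decidable (Spec_breaktoyear records out) := by unfold Spec_breaktoyear; infer_instance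

-- ===== CLAIM (what is proved, stated in full; the proofs are below) =====
def Claim_equal_breaktoyear : Prop := ∀ (records : List ((String × String) × Int)), Dom_breaktoyear records → Spec_breaktoyear records (breaktoyear records)

-- ===== LEMMAS AND PROOFS =====
lemma zip6_maps (rs : List ((String × String) × Int)) :
    zip6 (rs.map (fun r => r.1.1))
      (rs.map (fun r => if r.1.2 == "2015" then r.2 else 0))
      (rs.map (fun r => if r.1.2 == "2016" then r.2 else 0))
      (rs.map (fun r => if r.1.2 == "2017" then r.2 else 0))
      (rs.map (fun r => if r.1.2 == "2018" then r.2 else 0))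
      (rs.map (fun r => if r.1.2 == "2019" then r.2 else 0)) = breaktoyear rs := by
  induction rs with
  | nil => rfl
  | cons r rs ih =>
    obtain ⟨⟨name, y⟩, v⟩ := r
    simp only [List.map_cons, zip6, ih, breaktoyear]
    congr 1
    by_cases h15 : y = "2015"
    · simp [h15]
    by_cases h16 : y = "2016"
    · simp [h15, h16]
    by_cases h17 : y = "2017"
    · simp [h15, h16, h17]
    by_cases h18 : y = "2018"
    · simp [h15, h16, h17, h18]
    by_cases h19 : y = "2019"
    · simp [h15, h16, h17, h18, h19]
    simp [h15, h16, h17, h18, h19]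

-- ===== VERDICT (by name: the statement is the Claim_ definition above) =====
theorem breaktoyear_spec : Claim_equal_breaktoyear := by
  intro records _
  unfold Spec_breaktoyear breaktoyear_alt
  simp only [List.map_cons, List.map_nil]
  exact (zip6_maps records).symm
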